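-- pv_equiv track=rewrite | github.com/Andarch/H3_HotA_Map_Editor_X | h3mex/src/minimap/minimap.py | _should_skip_object
-- ===== SOURCE A (Python) =====
-- def _should_skip_object(blockMask: list, interactiveMask: list) -> bool:
--     # Skip objects that should not appear as blocked tiles on minimap:
--     # - Pickups/monsters (all yellow tiles - disappear when interacted with)
--     # - Magical terrain (all clear tiles - no physical presence)
--     hasYellowTiles = False
--     hasRedTiles = False
--     hasRedOrYellowTiles = False
--
--     for b, i in zip(blockMask, interactiveMask):
--         if i == 1:  # Interactive (yellow) tile
--             hasYellowTiles = True
--         if b == 0 and i == 0:  # Red (blocked, non-interactive) tile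
--             hasRedTiles = True
--         if b == 0:  # Any blocked tile (red or yellow)
--             hasRedOrYellowTiles = True
--
--         # Early exit: if we found a red tile, it's a permanent structure
--         if hasRedTiles:
--             return False
--
--     # Skip if: (all yellow with no red) OR (all clear tiles)
--     return (hasYellowTiles and not hasRedTiles) or not hasRedOrYellowTiles
-- ===== SOURCE B (Python) =====
-- def _should_skip_object(blockMask: list, interactiveMask: list) -> bool:
--     # Staged scan, a three-state machine whose state is the function running:
--     # phase 1 walks clear tiles; a yellow tile leaves only "no red ahead" to
--     # check, a plain blocked tile leaves "a yellow, then no red" to check.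
--     pairs = list(zip(blockMask, interactiveMask))
--     for k, (b, i) in enumerate(pairs):
--         if b == 0 and i == 0:
--             return False
--         if i == 1:
--             return _no_red(pairs[k + 1:])
--         if b == 0:
--             return _yellow_then_no_red(pairs[k + 1:])
--     return True
--
--
-- def _yellow_then_no_red(pairs):
--     # A blocked non-yellow tile was seen: need a yellow tile and no red one.
--     for k, (b, i) in enumerate(pairs):
--         if b == 0 and i == 0:
--             return False
--         if i == 1:
--             return _no_red(pairs[k + 1:])
--     return False
--
--
-- def _no_red(pairs):
--     # A yellow tile was seen: only a red tile can still forbid skipping.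
--     return all(not (b == 0 and i == 0) for b, i in pairs)
-- ===== Notes on version B (the rewrite author's own statement) =====
-- stated objective: alternative
-- what changed: Replaced the flag-carrying loop by a staged three-state machine: each phase is its own function (scan clear tiles; after a blocked tile, look for a yellow and no red; after a yellow, only check no red), so no boolean state is carried and no end-of-loop formula exists.
import Mathlib
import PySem

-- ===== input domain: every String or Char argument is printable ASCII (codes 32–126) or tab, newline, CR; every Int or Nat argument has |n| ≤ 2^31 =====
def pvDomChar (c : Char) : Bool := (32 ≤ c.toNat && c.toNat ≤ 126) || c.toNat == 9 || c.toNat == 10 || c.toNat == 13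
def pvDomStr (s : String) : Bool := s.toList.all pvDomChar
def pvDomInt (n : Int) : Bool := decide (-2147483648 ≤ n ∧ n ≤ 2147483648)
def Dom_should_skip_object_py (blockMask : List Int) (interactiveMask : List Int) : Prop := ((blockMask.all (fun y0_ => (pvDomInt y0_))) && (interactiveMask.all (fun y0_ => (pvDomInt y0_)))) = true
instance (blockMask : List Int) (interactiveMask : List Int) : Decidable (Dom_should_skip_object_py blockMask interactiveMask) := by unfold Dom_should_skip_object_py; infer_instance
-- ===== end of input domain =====

-- B replaces A's flag-carrying loop by a staged three-state machine (one function per phase, no boolean state); objective: alternative.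


-- ===== PORT A =====
-- loop over zip, carrying the three flags; early return False once a red tile is seen
def should_skip_object_loop : List (Int × Int) → Bool → Bool → Bool → Bool
  | [], hasYellowTiles, hasRedTiles, hasRedOrYellowTiles =>
      (hasYellowTiles && !hasRedTiles) || !hasRedOrYellowTiles
  | (b, i) :: rest, hasYellowTiles, hasRedTiles, hasRedOrYellowTiles =>
      let hasYellowTiles := if i == 1 then true else hasYellowTiles
      let hasRedTiles := if b == 0 && i == 0 then true else hasRedTiles
      let hasRedOrYellowTiles := if b == 0 then true else hasRedOrYellowTiles
      if hasRedTiles then false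
      else should_skip_object_loop rest hasYellowTiles hasRedTiles hasRedOrYellowTiles

def should_skip_object_py (blockMask : List Int) (interactiveMask : List Int) : Bool :=
  should_skip_object_loop (blockMask.zip interactiveMask) false false false

-- ===== PORT B =====
-- phase 3: a yellow tile was seen; only a red tile can still forbid skipping
def pv_no_red (pairs : List (Int × Int)) : Bool :=
  pairs.all (fun p => !(p.1 == 0 && p.2 == 0))

-- phase 2: a blocked non-yellow tile was seen; need a yellow tile and no red one
def pv_yellow_then_no_red : List (Int × Int) → Bool
  | [] => false
  | (b, i) :: rest =>
      if b == 0 && i == 0 then false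
      else if i == 1 then pv_no_red rest
      else pv_yellow_then_no_red rest

-- phase 1: walk clear tiles until some colored tile picks the remaining check
def pv_phase1 : List (Int × Int) → Bool
  | [] => true
  | (b, i) :: rest =>
      if b == 0 && i == 0 then false
      else if i == 1 then pv_no_red rest
      else if b == 0 then pv_yellow_then_no_red rest
      else pv_phase1 rest

def should_skip_object_py_alt (blockMask : List Int) (interactiveMask : List Int) : Bool :=
  pv_phase1 (blockMask.zip interactiveMask)

-- ===== PRECONDITION & SPEC =====
def Spec_should_skip_object_py (blockMask : List Int) (interactiveMask : List Int) (out : Bool) : Prop := out = should_skip_object_py_alt blockMask interactiveMask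
instance (blockMask : List Int) (interactiveMask : List Int) (out : Bool) : Decidable (Spec_should_skip_object_py blockMask interactiveMask out) := by unfold Spec_should_skip_object_py; infer_instance

-- ===== CLAIM (what is proved, stated in full; the proofs are below) =====
def Claim_equal_should_skip_object_py : Prop := ∀ (blockMask : List Int) (interactiveMask : List Int), Dom_should_skip_object_py blockMask interactiveMask → Spec_should_skip_object_py blockMask interactiveMask (should_skip_object_py blockMask interactiveMask)

-- ===== LEMMAS AND PROOFS =====
-- closed form of A's loop when hasRedTiles is still false
lemma should_skip_object_loop_eq (l : List (Int × Int)) :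
    ∀ (hy hroy : Bool),
      should_skip_object_loop l hy false hroy =
      (if l.any (fun p => p.1 == 0 && p.2 == 0) then false
       else (hy || l.any (fun p => p.2 == 1)) || !(hroy || l.any (fun p => p.1 == 0))) := by
  induction l with
  | nil => intro hy hroy; simp [should_skip_object_loop]
  | cons p rest ih =>
      intro hy hroy
      obtain ⟨b, i⟩ := p
      by_cases hb : b = 0 <;> by_cases hi0 : i = 0 <;>
        simp [should_skip_object_loop, hb, hi0, ih, List.any_cons] <;>
        by_cases hi1 : i = 1 <;>
        simp [hb, hi1, beq_eq_decide, Bool.or_comm, Bool.or_left_comm]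

lemma pv_no_red_eq (l : List (Int × Int)) :
    pv_no_red l = !(l.any (fun p => p.1 == 0 && p.2 == 0)) := by
  simp [pv_no_red, List.all_eq_not_any_not]

lemma pv_yellow_then_no_red_eq (l : List (Int × Int)) :
    pv_yellow_then_no_red l =
      (!(l.any (fun p => p.1 == 0 && p.2 == 0)) && l.any (fun p => p.2 == 1)) := by
  induction l with
  | nil => simp [pv_yellow_then_no_red]
  | cons p rest ih =>
      obtain ⟨b, i⟩ := p
      simp only [pv_yellow_then_no_red, List.any_cons]
      cases hr : (b == 0 && i == 0) <;> cases hy : (i == 1) <;>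
        simp [hr, hy, ih, pv_no_red_eq]

lemma pv_phase1_eq (l : List (Int × Int)) :
    pv_phase1 l =
      (if l.any (fun p => p.1 == 0 && p.2 == 0) then false
       else l.any (fun p => p.2 == 1) || !(l.any (fun p => p.1 == 0))) := by
  induction l with
  | nil => simp [pv_phase1]
  | cons p rest ih =>
      obtain ⟨b, i⟩ := p
      simp only [pv_phase1, List.any_cons]
      cases hr : (b == 0 && i == 0) <;> cases hy : (i == 1) <;> cases hb : (b == 0) <;>
        cases har : (rest.any fun p => p.1 == 0 && p.2 == 0) <;>
        simp [hr, hy, hb, har, ih, pv_no_red_eq, pv_yellow_then_no_red_eq]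

-- ===== VERDICT (by name: the statement is the Claim_ definition above) =====
theorem should_skip_object_py_spec : Claim_equal_should_skip_object_py := by
  intro bm im _
  unfold Spec_should_skip_object_py should_skip_object_py should_skip_object_py_alt
  rw [should_skip_object_loop_eq, pv_phase1_eq]
  simp
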